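-- pv_equiv track=rewrite | github.com/spector517/veepeenet | app/controller/commands/routing.py | _add_unique_items
-- ===== SOURCE A (Python) =====
-- from typing import Annotated, Literal, Any, get_args
--
-- def _add_unique_items(existing: list[Any], new_items: list[Any]) -> list[Any]:
--     existing_set = set(existing)
--     result = list(existing)
--     for item in new_items:
--         if item not in existing_set:
--             result.append(item)
--             existing_set.add(item)
--     return result
-- ===== SOURCE B (Python) =====
-- def _add_unique_items(existing, new_items):
--     # B: first-occurrence index map over the concatenation, then one stateless
--     # positional filter (keep position i iff it lies in the existing part or is
--     # the globally first occurrence of its value); no membership set, no growing state.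
--     combined = list(existing) + list(new_items)
--     first = {}
--     for i, x in enumerate(combined):
--         first.setdefault(x, i)
--     n = len(existing)
--     return [x for i, x in enumerate(combined) if i < n or first[x] == i]
-- ===== Notes on version B (the rewrite author's own statement) =====
-- stated objective: alternative
-- what changed: Instead of one pass growing a membership set and appending, B concatenates the two lists, builds a first-occurrence index map over the concatenation once, and keeps each position by a stateless filter: positions inside the existing part, or positions that are the globally first occurrence of their value.
import Mathlib
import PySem

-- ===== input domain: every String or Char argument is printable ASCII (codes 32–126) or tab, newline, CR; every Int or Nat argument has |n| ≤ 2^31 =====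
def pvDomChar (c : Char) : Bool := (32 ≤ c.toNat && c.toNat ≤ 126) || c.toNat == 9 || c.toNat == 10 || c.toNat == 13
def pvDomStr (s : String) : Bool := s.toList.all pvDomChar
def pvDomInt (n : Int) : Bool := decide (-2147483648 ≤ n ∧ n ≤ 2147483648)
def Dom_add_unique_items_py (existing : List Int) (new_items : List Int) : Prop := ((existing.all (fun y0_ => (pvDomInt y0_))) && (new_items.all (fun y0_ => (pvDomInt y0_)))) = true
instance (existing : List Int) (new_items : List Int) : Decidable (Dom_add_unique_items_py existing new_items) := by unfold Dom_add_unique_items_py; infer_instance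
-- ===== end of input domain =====

-- B builds a first-occurrence index map over the concatenation once and keeps a
-- position iff it lies in the existing part or is the globally first occurrence
-- of its value — a stateless positional filter instead of A's loop mutating a
-- membership set (alternative decomposition, same linear cost).

-- ===== PORT A =====
-- A's loop body: if item not in existing_set: result.append(item); existing_set.add(item)
def pvStepA (st : PySem.Set Int × List Int) (item : Int) : PySem.Set Int × List Int :=
  if PySem.Set.contains st.1 item then st else (PySem.Set.add st.1 item, st.2 ++ [item])

def add_unique_items_py (existing : List Int) (new_items : List Int) : List Int :=
  (new_items.foldl pvStepA (PySem.Set.ofList existing, existing)).2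

-- ===== PORT B =====
-- first = {}; for i, x in enumerate(combined): first.setdefault(x, i)
def pvFirstB (combined : List Int) : PySem.Dict Int Int :=
  (PySem.List.enumerate combined).foldl (fun d p => PySem.Dict.setdefault d p.2 p.1) PySem.Dict.empty

-- first[x] is read as get?; x is always a key of first since x comes from combined
def add_unique_items_py_alt (existing : List Int) (new_items : List Int) : List Int :=
  let combined := existing ++ new_items
  let first := pvFirstB combined
  let n : Int := existing.length
  ((PySem.List.enumerate combined).filter
      (fun p => decide (p.1 < n) || (PySem.Dict.get? first p.2 == some p.1))).map (·.2)

-- ===== PRECONDITION & SPEC =====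
def Spec_add_unique_items_py (existing : List Int) (new_items : List Int) (out : List Int) : Prop := out = add_unique_items_py_alt existing new_items
instance (existing : List Int) (new_items : List Int) (out : List Int) : Decidable (Spec_add_unique_items_py existing new_items out) := by unfold Spec_add_unique_items_py; infer_instance

-- ===== CLAIM (what is proved, stated in full; the proofs are below) =====
def Claim_equal_add_unique_items_py : Prop := ∀ (existing : List Int) (new_items : List Int), Dom_add_unique_items_py existing new_items → Spec_add_unique_items_py existing new_items (add_unique_items_py existing new_items)

-- ===== LEMMAS AND PROOFS =====

-- what A's loop appends, as a structural recursion over the remaining new items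
def pvApp (s : PySem.Set Int) : List Int → List Int
  | [] => []
  | x :: t => if PySem.Set.contains s x then pvApp s t else x :: pvApp (s ++ [x]) t

lemma pv_loop_eq (l : List Int) (s : PySem.Set Int) (r : List Int) :
    (l.foldl pvStepA (s, r)).2 = r ++ pvApp s l := by
  induction l generalizing s r with
  | nil => simp [pvApp]
  | cons x t ih =>
    by_cases h : x ∈ s
    · simp [pvApp, pvStepA, PySem.Set.contains, h, ih]
    · simp [pvApp, pvStepA, PySem.Set.contains, PySem.Set.add, h, ih]

lemma pv_app_eq_filter (l : List Int) (s : PySem.Set Int) :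
    pvApp s l = (PySem.Set.ofList l).filter (fun y => !PySem.Set.contains s y) := by
  induction l generalizing s with
  | nil => simp [pvApp, PySem.Set.ofList_nil]
  | cons x t ih =>
    rw [PySem.Set.ofList_cons]
    by_cases h : x ∈ s
    · simp only [pvApp, PySem.Set.contains, List.contains_iff_mem, if_pos h, ih,
        PySem.Set.discard, List.filter_filter, List.filter_cons]
      rw [if_neg (by simp [h])]
      apply List.filter_congr
      intro y hy
      by_cases hxy : y = x
      · subst hxy; simp [h]
      · simp [hxy]
    · simp only [pvApp, PySem.Set.contains, List.contains_iff_mem, if_neg h, ih,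
        PySem.Set.discard, List.filter_filter, List.filter_cons]
      rw [if_pos (by simp [h])]
      congr 1
      apply List.filter_congr
      intro y hy
      simp [List.mem_append]
      by_cases hxy : y = x
      · subst hxy; simp
      · simp [hxy]

-- the first-occurrence dict looks up the first index, offset by the start
lemma pv_first_get? (l : List Int) (s : Int) (d : PySem.Dict Int Int) (x : Int) :
    PySem.Dict.get? ((PySem.List.enumerate l s).foldl
        (fun d p => PySem.Dict.setdefault d p.2 p.1) d) x
      = ((PySem.Dict.get? d x).orElse (fun _ => (PySem.List.index? l x).map (fun k => s + Int.ofNat k))) := by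
  induction l generalizing s d with
  | nil => simp [PySem.List.enumerate]
  | cons y t ih =>
    rw [PySem.List.enumerate_cons]
    simp only [List.foldl_cons, ih]
    by_cases hxy : x = y
    · subst hxy
      cases hg : PySem.Dict.get? d x with
      | some v =>
        rw [PySem.Dict.setdefault_of_contains d _
          (by rw [PySem.Dict.contains_eq_isSome_get?, hg]; rfl)]
        simp [hg, Option.orElse]
      | none =>
        rw [PySem.Dict.setdefault_of_not_contains d _
          (by rw [PySem.Dict.contains_eq_isSome_get?, hg]; rfl)]
        rw [PySem.Dict.get?_insert_self]
        simp [List.idxOf?_cons, Option.orElse]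
    · rw [PySem.Dict.get?_setdefault_of_ne d _ hxy,
        PySem.List.index?_cons_of_ne t (fun h => hxy h.symm)]
      cases hg : PySem.Dict.get? d x with
      | none =>
        cases hi : PySem.List.index? t x with
        | none => simp [Option.orElse]
        | some k => simp [Option.orElse]; omega
      | some v => simp [Option.orElse]

-- x ∉ pre → first index of x in pre ++ x :: t is pre.length
lemma pv_index_append_cons (pre t : List Int) (x : Int) (h : x ∉ pre) :
    PySem.List.index? (pre ++ x :: t) x = some pre.length := by
  rw [PySem.List.index?_eq_some_iff]
  exact ⟨pre, t, rfl, rfl, h⟩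

-- the positional first-occurrence filter over the tail part equals the ordered dedup
-- of the new items minus the members of the prefix
lemma pv_pos_filter (t : List Int) (pre : List Int) :
    ((PySem.List.enumerate t (pre.length : Int)).filter
        (fun p => (PySem.List.index? (pre ++ t) p.2).map (fun k => Int.ofNat k) == some p.1)).map (·.2)
      = (PySem.Set.ofList t).filter (fun y => !(pre.contains y)) := by
  induction t generalizing pre with
  | nil => simp [PySem.List.enumerate, PySem.Set.ofList_nil]
  | cons x r ih =>
    rw [PySem.List.enumerate_cons, PySem.Set.ofList_cons]
    simp only [List.filter_cons]
    have htail : PySem.List.enumerate r ((pre.length : Int) + 1)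
        = PySem.List.enumerate r (((pre ++ [x]).length : Nat) : Int) := by
      simp
    have hlist : pre ++ x :: r = (pre ++ [x]) ++ r := by simp
    by_cases hx : x ∈ pre
    · -- head dropped on both sides
      obtain ⟨j, hj⟩ := Option.isSome_iff_exists.mp ((PySem.List.index?_isSome_iff pre x).mpr hx)
      obtain ⟨hjlt, -, -⟩ := PySem.List.getElem_of_index?_eq_some hj
      have hcond : ((PySem.List.index? (pre ++ x :: r) x).map (fun k => Int.ofNat k)
          == some ((pre.length : Nat) : Int)) = false := by
        rw [PySem.List.index?_append_of_mem _ hx, hj]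
        simp [Int.ofNat_eq_natCast]
        omega
      rw [hcond]
      have hcx : (!pre.contains x) = false := by simp [hx]
      rw [hcx]
      simp only [Bool.false_eq_true, if_false]
      rw [htail, hlist, ih]
      simp only [PySem.Set.discard, List.filter_filter]
      apply List.filter_congr
      intro y hy
      by_cases hxy : y = x
      · subst hxy
        simp [hx]
      · simp [hxy]
    · -- head kept on both sides
      have hcond : ((PySem.List.index? (pre ++ x :: r) x).map (fun k => Int.ofNat k)
          == some ((pre.length : Nat) : Int)) = true := by
        rw [pv_index_append_cons pre r x hx]
        simp [Int.ofNat_eq_natCast]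
      rw [hcond]
      have hcx : (!pre.contains x) = true := by simp [hx]
      rw [hcx]
      simp only [if_true]
      rw [htail, hlist, List.map_cons, ih]
      simp only [PySem.Set.discard, List.filter_filter]
      congr 1
      apply List.filter_congr
      intro y hy
      by_cases hxy : y = x
      · subst hxy
        simp
      · simp [hxy]

-- ===== VERDICT (by name: the statement is the Claim_ definition above) =====
theorem add_unique_items_py_spec : Claim_equal_add_unique_items_py := by
  intro existing new_items _
  unfold Spec_add_unique_items_py add_unique_items_py add_unique_items_py_alt pvFirstB
  rw [pv_loop_eq, pv_app_eq_filter]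
  have hget : ∀ y : Int, PySem.Dict.get?
      ((PySem.List.enumerate (existing ++ new_items) 0).foldl
        (fun d p => PySem.Dict.setdefault d p.2 p.1) PySem.Dict.empty) y
      = (PySem.List.index? (existing ++ new_items) y).map (fun k => Int.ofNat k) := by
    intro y
    rw [pv_first_get?]
    simp [PySem.Dict.empty, PySem.Dict.get?, Option.orElse, Int.ofNat_eq_natCast]
  simp only [hget]
  rw [show (0 : Int) = ((([] : List Int).length : Nat) : Int) by simp] at *
  rw [PySem.List.enumerate_append, List.filter_append, List.map_append]
  have h1 : (PySem.List.enumerate existing (((([] : List Int).length : Nat)) : Int)).filter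
      (fun p => decide (p.1 < (existing.length : Int))
        || ((PySem.List.index? (existing ++ new_items) p.2).map (fun k => Int.ofNat k) == some p.1))
      = PySem.List.enumerate existing (((([] : List Int).length : Nat)) : Int) := by
    apply List.filter_eq_self.mpr
    intro p hp
    obtain ⟨k, hk, rfl⟩ := (PySem.List.mem_enumerate_iff _ _ _).mp hp
    simp
    left
    omega
  have h2 : (PySem.List.enumerate new_items ((((([] : List Int).length : Nat)) : Int) + (existing.length : Int))).filter
      (fun p => decide (p.1 < (existing.length : Int))
        || ((PySem.List.index? (existing ++ new_items) p.2).map (fun k => Int.ofNat k) == some p.1))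
      = (PySem.List.enumerate new_items ((existing.length : Nat) : Int)).filter
        (fun p => (PySem.List.index? (existing ++ new_items) p.2).map (fun k => Int.ofNat k) == some p.1) := by
    rw [show (((([] : List Int).length : Nat)) : Int) + (existing.length : Int) = ((existing.length : Nat) : Int) by simp]
    apply List.filter_congr
    intro p hp
    obtain ⟨k, hk, rfl⟩ := (PySem.List.mem_enumerate_iff _ _ _).mp hp
    have : ¬ (((existing.length : Int) + (k : Int)) < (existing.length : Int)) := by omega
    simp [this]
  rw [h1, h2, PySem.List.map_snd_enumerate, pv_pos_filter]
  congr 1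
  apply List.filter_congr
  intro y hy
  simp [PySem.Set.contains]
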